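-- pv_equiv track=rewrite | github.com/lendkhoa/algorithm-py | algorithm_py/aws/longest_subsequent_with_removal.py | longest_subsegment
-- ===== SOURCE A (Python) =====
-- def longest_subsegment(arr, k):
--     n = len(arr)
--     max_len = 0
--
--     for target in set(arr):
--         left = 0
--         count = 0
--         curr_len = 0
--
--         for right in range(n):
--             if arr[right] == target:
--                 curr_len += 1
--             else:
--                 count += 1
--             while count > k:
--                 if arr[left] != target:
--                     count -= 1
--                 else:
--                     curr_len -= 1
--                 left += 1
--             if count <= k:
--                 max_len = max(max_len, curr_len)
--
--     return max_len
-- ===== SOURCE B (Python) =====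
-- def longest_subsegment(arr, k):
--     pos = {}
--     for i, v in enumerate(arr):
--         pos.setdefault(v, []).append(i)
--     best = 0
--     for p in pos.values():
--         i = 0
--         for j in range(len(p)):
--             while p[j] - p[i] - (j - i) > k:
--                 i += 1
--             if j - i + 1 > best:
--                 best = j - i + 1
--     return best
-- ===== Notes on version B (the rewrite author's own statement) =====
-- stated objective: faster
-- what changed: Instead of running a fresh sliding window over the whole array for every distinct value (A), B groups the indices of each value into position lists in one pass and slides a window over each position list using the gap formula p[j]-p[i]-(j-i) <= k, visiting each element O(1) times in total.
import Mathlib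
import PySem

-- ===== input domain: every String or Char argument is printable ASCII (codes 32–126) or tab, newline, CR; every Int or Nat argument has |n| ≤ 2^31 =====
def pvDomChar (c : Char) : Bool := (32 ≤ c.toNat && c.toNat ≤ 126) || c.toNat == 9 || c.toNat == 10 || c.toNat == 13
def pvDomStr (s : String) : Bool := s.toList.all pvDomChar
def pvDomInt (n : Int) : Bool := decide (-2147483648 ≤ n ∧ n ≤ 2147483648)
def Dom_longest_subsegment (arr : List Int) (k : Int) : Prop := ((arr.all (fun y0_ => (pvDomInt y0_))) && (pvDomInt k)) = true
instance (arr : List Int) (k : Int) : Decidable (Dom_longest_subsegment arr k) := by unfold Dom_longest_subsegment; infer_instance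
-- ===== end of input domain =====

-- B groups each value's indices into position lists in one pass and slides a window over each
-- position list with the gap formula, instead of A's fresh whole-array sliding window per distinct value.

-- ===== PORT A =====
def shrinkA (arr : List Int) (target k : Int) : Nat → Int × Int × Int → Int × Int × Int
  | 0, st => st
  | fuel + 1, (count, curr_len, left) =>
    if k < count then
      if PySem.List.pyGetD arr left 0 ≠ target then
        shrinkA arr target k fuel (count - 1, curr_len, left + 1)
      else
        shrinkA arr target k fuel (count, curr_len - 1, left + 1)
    else (count, curr_len, left)

def stepA (arr : List Int) (target k : Int) (st : Int × Int × Int × Int) (right : Int) :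
    Int × Int × Int × Int :=
  let (max_len, count, curr_len, left) := st
  let (count, curr_len) :=
    if PySem.List.pyGetD arr right 0 = target then (count, curr_len + 1)
    else (count + 1, curr_len)
  let (count, curr_len, left) := shrinkA arr target k (arr.length + 1) (count, curr_len, left)
  let max_len := if count ≤ k then max max_len curr_len else max_len
  (max_len, count, curr_len, left)

def innerA (arr : List Int) (target k max0 : Int) : Int :=
  ((PySem.List.pyRange 0 (PySem.List.len arr) 1).foldl (stepA arr target k) (max0, 0, 0, 0)).1


def longest_subsegment (arr : List Int) (k : Int) : Int :=
  (PySem.Set.ofList arr).foldl (fun max_len target => innerA arr target k max_len) 0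

-- ===== PORT B =====
def shrinkB (p : List Int) (k j : Int) : Nat → Int → Int
  | 0, i => i
  | fuel + 1, i =>
    if k < PySem.List.pyGetD p j 0 - PySem.List.pyGetD p i 0 - (j - i) then
      shrinkB p k j fuel (i + 1)
    else i

def stepB (p : List Int) (k : Int) (st : Int × Int) (j : Int) : Int × Int :=
  let (best, i) := st
  let i := shrinkB p k j (p.length + 1) i
  (if best < j - i + 1 then j - i + 1 else best, i)

def innerB (p : List Int) (k best0 : Int) : Int :=
  ((PySem.List.pyRange 0 (PySem.List.len p) 1).foldl (stepB p k) (best0, 0)).1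

def longest_subsegment_alt (arr : List Int) (k : Int) : Int :=
  (PySem.Dict.values ((PySem.List.enumerate arr).foldl
      (fun (d : PySem.Dict Int (List Int)) p => d.modify p.2 [] (· ++ [p.1]))
      PySem.Dict.empty)).foldl (fun best p => innerB p k best) 0

-- ===== PRECONDITION & SPEC =====
-- Pre_ excludes k < 0 with a nonempty arr: there Python A's `while count > k` never becomes false,
-- left runs past the end of arr and A raises IndexError (B raises IndexError there too).
def Pre_longest_subsegment (arr : List Int) (k : Int) : Prop := arr = [] ∨ 0 ≤ k
instance (arr : List Int) (k : Int) : Decidable (Pre_longest_subsegment arr k) := by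
  unfold Pre_longest_subsegment; infer_instance

def pvWitness_longest_subsegment : List Int × Int := ([1, 2, 1, 1, 3, 1], 1)

def Spec_longest_subsegment (arr : List Int) (k : Int) (out : Int) : Prop := out = longest_subsegment_alt arr k
instance (arr : List Int) (k : Int) (out : Int) : Decidable (Spec_longest_subsegment arr k out) := by unfold Spec_longest_subsegment; infer_instance

-- ===== CLAIM (what is proved, stated in full; the proofs are below) =====
def Claim_equal_longest_subsegment : Prop := ∀ (arr : List Int) (k : Int), Dom_longest_subsegment arr k → Pre_longest_subsegment arr k → Spec_longest_subsegment arr k (longest_subsegment arr k)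

-- ===== LEMMAS AND PROOFS =====

-- ---- prefix counts: targets (tp) and non-targets (np) among the first x elements ----
def tp (arr : List Int) (t : Int) (x : Nat) : Nat := (arr.take x).countP (fun a => a == t)
def np (arr : List Int) (t : Int) (x : Nat) : Nat := (arr.take x).countP (fun a => !(a == t))

lemma tp_succ (arr : List Int) (t : Int) (x : Nat) (hx : x < arr.length) :
    tp arr t (x+1) = tp arr t x + (if arr.getD x 0 = t then 1 else 0) := by
  unfold tp
  rw [List.take_succ, List.countP_append, List.getElem?_eq_getElem hx,
      List.getD_eq_getElem arr 0 hx]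
  simp [List.countP_cons]

lemma np_succ (arr : List Int) (t : Int) (x : Nat) (hx : x < arr.length) :
    np arr t (x+1) = np arr t x + (if arr.getD x 0 = t then 0 else 1) := by
  unfold np
  rw [List.take_succ, List.countP_append, List.getElem?_eq_getElem hx,
      List.getD_eq_getElem arr 0 hx]
  by_cases h : arr[x] = t <;> simp [List.countP_cons, h]

lemma tp_mono (arr : List Int) (t : Int) {x y : Nat} (h : x ≤ y) : tp arr t x ≤ tp arr t y := by
  unfold tp
  exact List.Sublist.countP_le (List.take_sublist_take_left h)

lemma np_mono (arr : List Int) (t : Int) {x y : Nat} (h : x ≤ y) : np arr t x ≤ np arr t y := by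
  unfold np
  exact List.Sublist.countP_le (List.take_sublist_take_left h)

lemma tp_add_np (arr : List Int) (t : Int) (x : Nat) (hx : x ≤ arr.length) :
    tp arr t x + np arr t x = x := by
  unfold tp np
  have := List.length_eq_countP_add_countP (p := fun a => a == t) (l := arr.take x)
  simp only [List.length_take] at this
  have h2 : (fun (a:Int) => !(a == t)) = (fun (a:Int) => decide (¬(a == t) = true)) := by
    funext a; cases h : a == t <;> simp
  rw [h2]
  omega

def Pl (arr : List Int) (t : Int) : List Nat :=
  (List.range arr.length).filter (fun i => arr.getD i 0 == t)

def PD (arr : List Int) (t : Int) (i : Nat) : Nat := (Pl arr t).getD i 0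

lemma tp_prefix (xs : List Int) (a t : Int) (x : Nat) (hx : x ≤ xs.length) :
    tp (xs ++ [a]) t x = tp xs t x := by
  unfold tp
  rw [List.take_append_of_le_length hx]

lemma Pl_append (xs : List Int) (a t : Int) :
    Pl (xs ++ [a]) t = Pl xs t ++ (if a = t then [xs.length] else []) := by
  unfold Pl
  rw [List.length_append, List.length_singleton, List.range_succ, List.filter_append]
  congr 1
  · apply List.filter_congr
    intro i hi
    rw [List.mem_range] at hi
    rw [List.getD_append _ _ _ _ hi]
  · simp only [List.filter_cons, List.filter_nil]
    have : (xs ++ [a]).getD xs.length 0 = a := by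
      rw [List.getD_eq_getElem _ 0 (by simp)]
      simp
    rw [this]
    by_cases h : a = t <;> simp [h]

lemma Pl_master (arr : List Int) (t : Int) :
    (Pl arr t).length = tp arr t arr.length ∧
    ∀ j, j < (Pl arr t).length →
      PD arr t j < arr.length ∧ arr.getD (PD arr t j) 0 = t ∧ tp arr t (PD arr t j) = j := by
  induction arr using List.reverseRecOn with
  | nil => simp [Pl, tp, PD]
  | append_singleton xs a ih =>
    obtain ⟨ihlen, ihj⟩ := ih
    have hP := Pl_append xs a t
    have hlen : (Pl (xs ++ [a]) t).length = (Pl xs t).length + (if a = t then 1 else 0) := by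
      rw [hP]; by_cases h : a = t <;> simp [h]
    have htp : tp (xs ++ [a]) t (xs.length + 1) = tp xs t xs.length + (if a = t then 1 else 0) := by
      have := tp_succ (xs ++ [a]) t xs.length (by simp)
      rw [tp_prefix xs a t xs.length le_rfl] at this
      have hg : (xs ++ [a]).getD xs.length 0 = a := by
        rw [List.getD_eq_getElem _ 0 (by simp)]; simp
      rw [hg] at this
      exact this
    constructor
    · rw [hlen]; simp only [List.length_append, List.length_singleton]; rw [htp, ihlen]
    · intro j hj
      rw [hlen] at hj
      by_cases hcase : j < (Pl xs t).length
      · have hPD : PD (xs ++ [a]) t j = PD xs t j := by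
          unfold PD
          rw [hP, List.getD_append _ _ _ _ hcase]
        obtain ⟨h1, h2, h3⟩ := ihj j hcase
        refine ⟨by simp; omega, ?_, ?_⟩
        · rw [hPD, List.getD_append _ _ _ _ h1]; exact h2
        · rw [hPD, tp_prefix xs a t _ (le_of_lt h1)]; exact h3
      · -- j = (Pl xs t).length and a = t
        have ha : a = t := by by_contra h; simp [h] at hj; omega
        have hje : j = (Pl xs t).length := by simp [ha] at hj; omega
        have hPD : PD (xs ++ [a]) t j = xs.length := by
          unfold PD
          rw [hP, hje, ha, if_pos rfl, List.getD_append_right _ _ _ _ le_rfl]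
          simp
        refine ⟨by rw [hPD]; simp, ?_, ?_⟩
        · rw [hPD, List.getD_eq_getElem _ 0 (by simp)]; simp [ha]
        · rw [hPD, tp_prefix xs a t _ le_rfl, hje, ihlen]

lemma length_Pl (arr : List Int) (t : Int) : (Pl arr t).length = tp arr t arr.length :=
  (Pl_master arr t).1

lemma PD_facts (arr : List Int) (t : Int) (j : Nat) (hj : j < (Pl arr t).length) :
    PD arr t j < arr.length ∧ arr.getD (PD arr t j) 0 = t ∧ tp arr t (PD arr t j) = j :=
  (Pl_master arr t).2 j hj

lemma tp_PD_succ (arr : List Int) (t : Int) (j : Nat) (hj : j < (Pl arr t).length) :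
    tp arr t (PD arr t j + 1) = j + 1 := by
  obtain ⟨h1, h2, h3⟩ := PD_facts arr t j hj
  rw [tp_succ arr t _ h1, if_pos h2, h3]

lemma np_PD_succ (arr : List Int) (t : Int) (j : Nat) (hj : j < (Pl arr t).length) :
    np arr t (PD arr t j + 1) = np arr t (PD arr t j) := by
  obtain ⟨h1, h2, h3⟩ := PD_facts arr t j hj
  rw [np_succ arr t _ h1, if_pos h2]
  omega

lemma PD_next (arr : List Int) (t : Int) (l : Nat) (hl : tp arr t l < (Pl arr t).length) :
    l ≤ PD arr t (tp arr t l) := by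
  by_contra h
  push_neg at h
  have h1 := tp_PD_succ arr t _ hl
  have h2 : tp arr t (PD arr t (tp arr t l) + 1) ≤ tp arr t l := tp_mono arr t (by omega)
  omega

lemma PD_last (arr : List Int) (t : Int) (x j : Nat) (hj : j < (Pl arr t).length)
    (hx : tp arr t x = j + 1) : PD arr t j < x := by
  by_contra h
  push_neg at h
  have h1 := (PD_facts arr t j hj).2.2
  have h2 : tp arr t x ≤ tp arr t (PD arr t j) := tp_mono arr t h
  omega

lemma PD_mono (arr : List Int) (t : Int) {i j : Nat} (hij : i ≤ j) (hj : j < (Pl arr t).length) :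
    PD arr t i ≤ PD arr t j := by
  by_contra h
  push_neg at h
  have h1 := (PD_facts arr t i (by omega)).2.2
  have h2 := (PD_facts arr t j hj).2.2
  have h3 : tp arr t (PD arr t j) ≤ tp arr t (PD arr t i) := tp_mono arr t (le_of_lt h)
  have heq : i = j := by omega
  subst heq
  omega

lemma PD_strict (arr : List Int) (t : Int) {i j : Nat} (hij : i < j) (hj : j < (Pl arr t).length) :
    PD arr t i < PD arr t j := by
  by_contra h
  push_neg at h
  have h1 := tp_PD_succ arr t i (by omega)
  have h2 := (PD_facts arr t j hj).2.2
  have h3 : tp arr t (PD arr t j + 1) ≤ tp arr t (PD arr t i + 1) := tp_mono arr t (by omega)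
  have h4 := tp_PD_succ arr t j hj
  omega

-- ---- minimal window starts ----
lemma LmP_ex (arr : List Int) (t k : Int) (m : Nat) :
    ∃ l, m ≤ l ∨ ((np arr t m - np arr t l : Nat) : Int) ≤ k := ⟨m, Or.inl le_rfl⟩

def Lm (arr : List Int) (t k : Int) (m : Nat) : Nat := Nat.find (LmP_ex arr t k m)

lemma Lm_le (arr : List Int) (t k : Int) (m : Nat) : Lm arr t k m ≤ m :=
  Nat.find_min' _ (Or.inl le_rfl)

lemma Lm_Q (arr : List Int) (t k : Int) (hk : 0 ≤ k) (m : Nat) :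
    ((np arr t m - np arr t (Lm arr t k m) : Nat) : Int) ≤ k := by
  rcases Nat.find_spec (LmP_ex arr t k m) with h | h
  · have := Lm_le arr t k m
    have he : Lm arr t k m = m := le_antisymm this h
    rw [he]
    simp [hk]
  · exact h

lemma Lm_min (arr : List Int) (t k : Int) (m l : Nat)
    (h : ((np arr t m - np arr t l : Nat) : Int) ≤ k) : Lm arr t k m ≤ l :=
  Nat.find_min' _ (Or.inr h)

lemma Lm_lt_of_notQ (arr : List Int) (t k : Int) (hk : 0 ≤ k) (m l : Nat)
    (h : ¬ ((np arr t m - np arr t l : Nat) : Int) ≤ k) : l < Lm arr t k m := by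
  by_contra hc
  push_neg at hc
  apply h
  calc ((np arr t m - np arr t l : Nat) : Int)
      ≤ ((np arr t m - np arr t (Lm arr t k m) : Nat) : Int) := by
        have := np_mono arr t hc
        omega
    _ ≤ k := Lm_Q arr t k hk m

lemma Lm_mono (arr : List Int) (t k : Int) (hk : 0 ≤ k) (m : Nat) :
    Lm arr t k m ≤ Lm arr t k (m+1) := by
  apply Lm_min
  have h1 := Lm_Q arr t k hk (m+1)
  have h2 : np arr t m ≤ np arr t (m+1) := np_mono arr t (by omega)
  omega

lemma ImP_ex (arr : List Int) (t k : Int) (j : Nat) :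
    ∃ i, j ≤ i ∨ ((np arr t (PD arr t j + 1) - np arr t (PD arr t i) : Nat) : Int) ≤ k :=
  ⟨j, Or.inl le_rfl⟩

def Im (arr : List Int) (t k : Int) (j : Nat) : Nat := Nat.find (ImP_ex arr t k j)

lemma Im_le (arr : List Int) (t k : Int) (j : Nat) : Im arr t k j ≤ j :=
  Nat.find_min' _ (Or.inl le_rfl)

lemma Im_Q (arr : List Int) (t k : Int) (hk : 0 ≤ k) (j : Nat) (hj : j < (Pl arr t).length) :
    ((np arr t (PD arr t j + 1) - np arr t (PD arr t (Im arr t k j)) : Nat) : Int) ≤ k := by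
  rcases Nat.find_spec (ImP_ex arr t k j) with h | h
  · have he : Im arr t k j = j := le_antisymm (Im_le arr t k j) h
    rw [he, np_PD_succ arr t j hj]
    simp [hk]
  · exact h

lemma Im_min (arr : List Int) (t k : Int) (j i : Nat)
    (h : ((np arr t (PD arr t j + 1) - np arr t (PD arr t i) : Nat) : Int) ≤ k) :
    Im arr t k j ≤ i :=
  Nat.find_min' _ (Or.inr h)

lemma Im_mono (arr : List Int) (t k : Int) (hk : 0 ≤ k) (j : Nat)
    (hj : j < (Pl arr t).length) (hj1 : j + 1 < (Pl arr t).length) :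
    Im arr t k j ≤ Im arr t k (j+1) := by
  by_cases hc : j < Im arr t k (j+1)
  · exact le_trans (Im_le arr t k j) (by omega)
  · push_neg at hc
    apply Im_min
    have h1 := Im_Q arr t k hk (j+1) hj1
    have h2 : PD arr t j + 1 ≤ PD arr t (j+1) + 1 := by
      have := PD_strict arr t (show j < j+1 by omega) hj1
      omega
    have h3 : np arr t (PD arr t j + 1) ≤ np arr t (PD arr t (j+1) + 1) := np_mono arr t h2
    omega

-- ---- the recorded window sizes per step, and their running maxima ----
def supA (arr : List Int) (t k : Int) (m : Nat) : Nat :=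
  (List.range m).foldl
    (fun acc x => max acc (tp arr t (x+1) - tp arr t (Lm arr t k (x+1)))) 0

def supB (arr : List Int) (t k : Int) (m : Nat) : Nat :=
  (List.range m).foldl (fun acc j => max acc (j - Im arr t k j + 1)) 0

-- ---- loop lemmas ----
lemma shrinkA_spec (arr : List Int) (t k : Int) (hk : 0 ≤ k) (m : Nat) (hm : m ≤ arr.length) :
    ∀ (fuel l : Nat), l ≤ Lm arr t k m → Lm arr t k m - l < fuel →
    shrinkA arr t k fuel
        (((np arr t m - np arr t l : Nat) : Int), ((tp arr t m - tp arr t l : Nat) : Int), (l : Int)) =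
      (((np arr t m - np arr t (Lm arr t k m) : Nat) : Int),
       ((tp arr t m - tp arr t (Lm arr t k m) : Nat) : Int), ((Lm arr t k m : Nat) : Int)) := by
  intro fuel
  induction fuel with
  | zero => intro l _ h; omega
  | succ fuel ih =>
    intro l hl hfuel
    by_cases hc : k < ((np arr t m - np arr t l : Nat) : Int)
    · have hnotQ : ¬ ((np arr t m - np arr t l : Nat) : Int) ≤ k := by omega
      have hlt : l < Lm arr t k m := Lm_lt_of_notQ arr t k hk m l hnotQ
      have hln : l < arr.length := lt_of_lt_of_le (lt_of_lt_of_le hlt (Lm_le arr t k m)) hm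
      have hlm : l < m := lt_of_lt_of_le hlt (Lm_le arr t k m)
      have hget : PySem.List.pyGetD arr (l : Int) 0 = arr.getD l 0 := by
        simp [PySem.List.pyGetD_natCast, List.getD_eq_getElem?_getD]
      have hnplt : np arr t l < np arr t m := by
        by_contra hcc
        push_neg at hcc
        have : np arr t m - np arr t l = 0 := by omega
        rw [this] at hc
        simp at hc
        omega
      simp only [shrinkA, if_pos hc, hget]
      by_cases ht : arr.getD l 0 = t
      · -- target at left: curr_len decreases
        rw [if_neg (not_not_intro ht)]
        have htps := tp_succ arr t l hln
        have hnps := np_succ arr t l hln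
        rw [if_pos ht] at htps hnps
        have htple : tp arr t (l+1) ≤ tp arr t m := tp_mono arr t (by omega)
        have h1 : ((np arr t m - np arr t l : Nat) : Int) = ((np arr t m - np arr t (l+1) : Nat) : Int) := by omega
        have h2 : ((tp arr t m - tp arr t l : Nat) : Int) - 1 = ((tp arr t m - tp arr t (l+1) : Nat) : Int) := by omega
        rw [show ((l:Int) + 1) = ((l+1 : Nat) : Int) by omega, h1, h2]
        exact ih (l+1) (by omega) (by omega)
      · rw [if_pos ht]
        have htps := tp_succ arr t l hln
        have hnps := np_succ arr t l hln
        rw [if_neg ht] at htps hnps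
        have hnple : np arr t (l+1) ≤ np arr t m := np_mono arr t (by omega)
        have h1 : ((np arr t m - np arr t l : Nat) : Int) - 1 = ((np arr t m - np arr t (l+1) : Nat) : Int) := by omega
        have h2 : ((tp arr t m - tp arr t l : Nat) : Int) = ((tp arr t m - tp arr t (l+1) : Nat) : Int) := by omega
        rw [show ((l:Int) + 1) = ((l+1 : Nat) : Int) by omega, h1, h2]
        exact ih (l+1) (by omega) (by omega)
    · have hQ : ((np arr t m - np arr t l : Nat) : Int) ≤ k := by omega
      have : Lm arr t k m = l := le_antisymm (Lm_min arr t k m l hQ) hl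
      subst this
      simp only [shrinkA, if_neg hc]

lemma shrinkB_spec (arr : List Int) (t k : Int) (hk : 0 ≤ k) (j : Nat)
    (hj : j < (Pl arr t).length) :
    ∀ (fuel i : Nat), i ≤ Im arr t k j → Im arr t k j - i < fuel →
    shrinkB ((Pl arr t).map (fun (a : Nat) => (a : Int))) k (j : Int) fuel (i : Int) =
      ((Im arr t k j : Nat) : Int) := by
  intro fuel
  induction fuel with
  | zero => intro i _ h; omega
  | succ fuel ih =>
    intro i hi hfuel
    have hij : i ≤ j := le_trans hi (Im_le arr t k j)
    have hPlj : (Pl arr t)[j]? = some (PD arr t j) := by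
      rw [List.getElem?_eq_getElem hj]
      unfold PD
      rw [List.getD_eq_getElem _ 0 hj]
    have hPli : (Pl arr t)[i]? = some (PD arr t i) := by
      rw [List.getElem?_eq_getElem (lt_of_le_of_lt hij hj)]
      unfold PD
      rw [List.getD_eq_getElem _ 0 (lt_of_le_of_lt hij hj)]
    have hgetj : PySem.List.pyGetD ((Pl arr t).map (fun (a : Nat) => (a : Int))) (j : Int) 0 =
        ((PD arr t j : Nat) : Int) := by
      simp [PySem.List.pyGetD_natCast, List.getD_eq_getElem?_getD, List.getElem?_map, hPlj]
    have hgeti : PySem.List.pyGetD ((Pl arr t).map (fun (a : Nat) => (a : Int))) (i : Int) 0 =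
        ((PD arr t i : Nat) : Int) := by
      simp [PySem.List.pyGetD_natCast, List.getD_eq_getElem?_getD, List.getElem?_map, hPli]
    -- the gap equals the non-target count between the two positions
    have hgap : ((PD arr t j : Nat) : Int) - ((PD arr t i : Nat) : Int) - ((j : Int) - (i : Int)) =
        ((np arr t (PD arr t j + 1) - np arr t (PD arr t i) : Nat) : Int) := by
      have hin := (PD_facts arr t i (lt_of_le_of_lt hij hj)).2.2
      have hjn := (PD_facts arr t j hj).2.2
      have hjl := (PD_facts arr t j hj).1
      have hmono : PD arr t i ≤ PD arr t j := PD_mono arr t hij hj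
      have h1 := tp_add_np arr t (PD arr t j + 1) (by omega)
      have h2 := tp_add_np arr t (PD arr t i) (by omega)
      have h3 := tp_PD_succ arr t j hj
      have h4 : np arr t (PD arr t i) ≤ np arr t (PD arr t j + 1) := np_mono arr t (by omega)
      omega
    simp only [shrinkB, hgetj, hgeti, hgap]
    by_cases hc : k < ((np arr t (PD arr t j + 1) - np arr t (PD arr t i) : Nat) : Int)
    · rw [if_pos hc]
      have hlt : i < Im arr t k j := by
        rcases Nat.lt_or_ge i (Im arr t k j) with h | h
        · exact h
        · have : Im arr t k j = i := by omega
          rw [← this] at hc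
          have := Im_Q arr t k hk j hj
          omega
      rw [show ((i:Int) + 1) = ((i+1 : Nat) : Int) by omega]
      exact ih (i+1) (by omega) (by omega)
    · rw [if_neg hc]
      have : Im arr t k j = i := le_antisymm (Im_min arr t k j i (by omega)) hi
      rw [this]

lemma np_zero (arr : List Int) (t : Int) : np arr t 0 = 0 := by simp [np]
lemma tp_zero (arr : List Int) (t : Int) : tp arr t 0 = 0 := by simp [tp]

lemma supA_succ (arr : List Int) (t k : Int) (m : Nat) :
    supA arr t k (m+1) = max (supA arr t k m) (tp arr t (m+1) - tp arr t (Lm arr t k (m+1))) := by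
  simp [supA, List.range_succ]

lemma supB_succ (arr : List Int) (t k : Int) (m : Nat) :
    supB arr t k (m+1) = max (supB arr t k m) (m - Im arr t k m + 1) := by
  simp [supB, List.range_succ]

lemma ite_lt_max (x y : Int) : (if x < y then y else x) = max x y := by
  by_cases h : x < y
  · rw [if_pos h, max_eq_right (le_of_lt h)]
  · rw [if_neg h, max_eq_left (by omega)]

lemma foldA (arr : List Int) (t k : Int) (hk : 0 ≤ k) (m0 : Int) (hm0 : 0 ≤ m0) :
    ∀ m, m ≤ arr.length →
    (PySem.List.pyRange 0 (m : Int) 1).foldl (stepA arr t k) (m0, 0, 0, 0) =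
      (max m0 ((supA arr t k m : Nat) : Int),
       ((np arr t m - np arr t (Lm arr t k m) : Nat) : Int),
       ((tp arr t m - tp arr t (Lm arr t k m) : Nat) : Int),
       ((Lm arr t k m : Nat) : Int)) := by
  intro m
  induction m with
  | zero =>
    intro _
    rw [Nat.cast_zero, PySem.List.pyRange_one_eq_nil le_rfl]
    have hL : Lm arr t k 0 = 0 := Nat.le_zero.mp (Lm_le arr t k 0)
    simp [hL, np_zero, tp_zero, supA, max_eq_left hm0]
  | succ m ih =>
    intro hm1
    have hm : m ≤ arr.length := by omega
    have hcast : ((m+1 : Nat) : Int) = (m : Int) + 1 := by push_cast; ring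
    rw [hcast, PySem.List.pyRange_one_succ_right (Int.natCast_nonneg m), List.foldl_append,
        ih hm]
    simp only [List.foldl_cons, List.foldl_nil]
    -- one step of stepA
    have hget : PySem.List.pyGetD arr (m : Int) 0 = arr.getD m 0 := by
      simp [PySem.List.pyGetD_natCast, List.getD_eq_getElem?_getD]
    have hLle : Lm arr t k m ≤ m := Lm_le arr t k m
    have hLle1 : Lm arr t k (m+1) ≤ m+1 := Lm_le arr t k (m+1)
    have hLmono : Lm arr t k m ≤ Lm arr t k (m+1) := Lm_mono arr t k hk m
    have hnpm : np arr t (Lm arr t k m) ≤ np arr t m := np_mono arr t hLle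
    have htpm : tp arr t (Lm arr t k m) ≤ tp arr t m := tp_mono arr t hLle
    have htps := tp_succ arr t m (by omega)
    have hnps := np_succ arr t m (by omega)
    have hshrink := shrinkA_spec arr t k hk (m+1) (by omega) (arr.length + 1)
      (Lm arr t k m) hLmono (by omega)
    have hQ := Lm_Q arr t k hk (m+1)
    simp only [stepA, hget]
    by_cases ht : arr.getD m 0 = t
    · rw [if_pos ht] at htps hnps
      rw [if_pos ht]
      have e1 : ((np arr t m - np arr t (Lm arr t k m) : Nat) : Int) =
          ((np arr t (m+1) - np arr t (Lm arr t k m) : Nat) : Int) := by omega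
      have e2 : ((tp arr t m - tp arr t (Lm arr t k m) : Nat) : Int) + 1 =
          ((tp arr t (m+1) - tp arr t (Lm arr t k m) : Nat) : Int) := by omega
      rw [e1, e2, hshrink, if_pos hQ, supA_succ, Nat.cast_max, max_assoc]
    · rw [if_neg ht] at htps hnps
      rw [if_neg ht]
      have e1 : ((np arr t m - np arr t (Lm arr t k m) : Nat) : Int) + 1 =
          ((np arr t (m+1) - np arr t (Lm arr t k m) : Nat) : Int) := by omega
      have e2 : ((tp arr t m - tp arr t (Lm arr t k m) : Nat) : Int) =
          ((tp arr t (m+1) - tp arr t (Lm arr t k m) : Nat) : Int) := by omega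
      rw [e1, e2, hshrink, if_pos hQ, supA_succ, Nat.cast_max, max_assoc]

lemma innerA_eq (arr : List Int) (t k : Int) (hk : 0 ≤ k) (m0 : Int) (hm0 : 0 ≤ m0) :
    innerA arr t k m0 = max m0 ((supA arr t k arr.length : Nat) : Int) := by
  unfold innerA
  rw [PySem.List.len_eq, foldA arr t k hk m0 hm0 arr.length le_rfl]

def IS (arr : List Int) (t k : Int) : Nat → Nat
  | 0 => 0
  | m + 1 => Im arr t k m

lemma foldB (arr : List Int) (t k : Int) (hk : 0 ≤ k) (b0 : Int) (hb0 : 0 ≤ b0) :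
    ∀ m, m ≤ (Pl arr t).length →
    (PySem.List.pyRange 0 (m : Int) 1).foldl
        (stepB ((Pl arr t).map (fun (a : Nat) => (a : Int))) k) (b0, 0) =
      (max b0 ((supB arr t k m : Nat) : Int), ((IS arr t k m : Nat) : Int)) := by
  intro m
  induction m with
  | zero =>
    intro _
    rw [Nat.cast_zero, PySem.List.pyRange_one_eq_nil le_rfl]
    simp [supB, IS, max_eq_left hb0]
  | succ m ih =>
    intro hm1
    have hm : m ≤ (Pl arr t).length := by omega
    have hmlt : m < (Pl arr t).length := by omega
    have hcast : ((m+1 : Nat) : Int) = (m : Int) + 1 := by push_cast; ring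
    rw [hcast, PySem.List.pyRange_one_succ_right (Int.natCast_nonneg m), List.foldl_append,
        ih hm]
    simp only [List.foldl_cons, List.foldl_nil]
    have hIS : IS arr t k m ≤ Im arr t k m := by
      cases m with
      | zero => exact Nat.zero_le _
      | succ m' => exact Im_mono arr t k hk m' (by omega) (by omega)
    have hImle : Im arr t k m ≤ m := Im_le arr t k m
    have hshrink := shrinkB_spec arr t k hk m hmlt
      (((Pl arr t).map (fun (a : Nat) => (a : Int))).length + 1) (IS arr t k m) hIS
      (by rw [List.length_map]; omega)
    simp only [stepB, hshrink]
    have e1 : (m : Int) - ((Im arr t k m : Nat) : Int) + 1 =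
        ((m - Im arr t k m + 1 : Nat) : Int) := by omega
    rw [e1, ite_lt_max, supB_succ, Nat.cast_max, max_assoc]
    rfl

lemma innerB_eq (arr : List Int) (t k : Int) (hk : 0 ≤ k) (b0 : Int) (hb0 : 0 ≤ b0) :
    innerB ((Pl arr t).map (fun (a : Nat) => (a : Int))) k b0 =
      max b0 ((supB arr t k (Pl arr t).length : Nat) : Int) := by
  unfold innerB
  rw [PySem.List.len_eq, List.length_map,
      foldB arr t k hk b0 hb0 (Pl arr t).length le_rfl]

lemma foldl_max_le {α : Type} (f : α → Nat) (l : List α) (init c : Nat)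
    (h0 : init ≤ c) (h : ∀ x ∈ l, f x ≤ c) :
    l.foldl (fun a x => max a (f x)) init ≤ c := by
  induction l generalizing init with
  | nil => exact h0
  | cons y ys ih =>
    simp only [List.foldl_cons]
    exact ih (max init (f y)) (by
      have := h y (by simp)
      omega) (fun x hx => h x (List.mem_cons_of_mem _ hx))

lemma supA_le_supB (arr : List Int) (t k : Int) (hk : 0 ≤ k) :
    supA arr t k arr.length ≤ supB arr t k (Pl arr t).length := by
  unfold supA
  apply foldl_max_le _ _ _ _ (Nat.zero_le _)
  intro x hx
  rw [List.mem_range] at hx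
  have hr : x + 1 ≤ arr.length := by omega
  by_cases hT : tp arr t (x+1) ≤ tp arr t (Lm arr t k (x+1))
  · have : tp arr t (x+1) - tp arr t (Lm arr t k (x+1)) = 0 := by omega
    rw [this]; exact Nat.zero_le _
  · push_neg at hT
    have htpLe : tp arr t (x+1) ≤ (Pl arr t).length := by
      rw [length_Pl]; exact tp_mono arr t hr
    set j := tp arr t (x+1) - 1 with hj
    have hjlen : j < (Pl arr t).length := by omega
    have hjx : tp arr t (x+1) = j + 1 := by omega
    set i0 := tp arr t (Lm arr t k (x+1)) with hi0
    have hi0j : i0 ≤ j := by omega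
    have hi0len : i0 < (Pl arr t).length := by omega
    have hnext : Lm arr t k (x+1) ≤ PD arr t i0 := PD_next arr t _ hi0len
    have hlast : PD arr t j < x + 1 := PD_last arr t (x+1) j hjlen hjx
    have hQL := Lm_Q arr t k hk (x+1)
    have hm1 : np arr t (PD arr t j + 1) ≤ np arr t (x+1) := np_mono arr t (by omega)
    have hm2 : np arr t (Lm arr t k (x+1)) ≤ np arr t (PD arr t i0) := np_mono arr t hnext
    have hm3 : np arr t (PD arr t i0) ≤ np arr t (PD arr t j + 1) := by
      apply np_mono
      have := PD_mono arr t hi0j hjlen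
      omega
    have hQ : ((np arr t (PD arr t j + 1) - np arr t (PD arr t i0) : Nat) : Int) ≤ k := by omega
    have hIm : Im arr t k j ≤ i0 := Im_min arr t k j i0 hQ
    have hImj : Im arr t k j ≤ j := Im_le arr t k j
    have hle : tp arr t (x+1) - tp arr t (Lm arr t k (x+1)) ≤ j - Im arr t k j + 1 := by omega
    refine le_trans hle ?_
    exact (PySem.List.le_foldl_max_nat (List.range (Pl arr t).length)
      (fun j => j - Im arr t k j + 1) 0).2 j (List.mem_range.mpr hjlen)

lemma supB_le_supA (arr : List Int) (t k : Int) (hk : 0 ≤ k) :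
    supB arr t k (Pl arr t).length ≤ supA arr t k arr.length := by
  unfold supB
  apply foldl_max_le _ _ _ _ (Nat.zero_le _)
  intro j hj
  rw [List.mem_range] at hj
  obtain ⟨hPDlt, hPDval, hPDtp⟩ := PD_facts arr t j hj
  set r := PD arr t j + 1 with hr
  have hrlen : r ≤ arr.length := by omega
  have htpr : tp arr t r = j + 1 := tp_PD_succ arr t j hj
  have hnpr : np arr t r = np arr t (PD arr t j) := np_PD_succ arr t j hj
  -- Lm r ≤ PD j
  have hLmPD : Lm arr t k r ≤ PD arr t j := by
    apply Lm_min
    have : np arr t (PD arr t j) ≤ np arr t r := np_mono arr t (by omega)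
    omega
  set i0 := tp arr t (Lm arr t k r) with hi0
  have hi0j : i0 ≤ j := by
    rw [hi0, ← hPDtp]
    exact tp_mono arr t hLmPD
  have hi0len : i0 < (Pl arr t).length := by omega
  have hnext : Lm arr t k r ≤ PD arr t i0 := PD_next arr t _ hi0len
  have hQL := Lm_Q arr t k hk r
  -- Im j ≤ i0
  have hm2 : np arr t (Lm arr t k r) ≤ np arr t (PD arr t i0) := np_mono arr t hnext
  have hm3 : np arr t (PD arr t i0) ≤ np arr t r := by
    apply np_mono
    have := PD_mono arr t hi0j hj
    omega
  have hIm : Im arr t k j ≤ i0 :=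
    Im_min arr t k j i0 (by rw [← hr]; omega)
  -- i0 ≤ Im j
  have hImQ := Im_Q arr t k hk j hj
  have hLmIm : Lm arr t k r ≤ PD arr t (Im arr t k j) := by
    apply Lm_min
    rw [← hr] at hImQ
    have : np arr t (PD arr t (Im arr t k j)) ≤ np arr t r :=
      np_mono arr t (by
        have := PD_mono arr t (Im_le arr t k j) hj
        omega)
    omega
  have hi0Im : i0 ≤ Im arr t k j := by
    rw [hi0]
    have h1 : tp arr t (Lm arr t k r) ≤ tp arr t (PD arr t (Im arr t k j)) :=
      tp_mono arr t hLmIm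
    have h2 := (PD_facts arr t (Im arr t k j) (by have := Im_le arr t k j; omega)).2.2
    omega
  have hieq : i0 = Im arr t k j := le_antisymm hi0Im hIm
  have htpLm : tp arr t (Lm arr t k r) ≤ tp arr t r := tp_mono arr t (Lm_le arr t k r)
  have hval : j - Im arr t k j + 1 = tp arr t r - tp arr t (Lm arr t k r) := by
    have := Im_le arr t k j
    omega
  rw [hval]
  have hmem : PD arr t j ∈ List.range arr.length := List.mem_range.mpr hPDlt
  have := (PySem.List.le_foldl_max_nat (List.range arr.length)
    (fun x => tp arr t (x+1) - tp arr t (Lm arr t k (x+1))) 0).2 (PD arr t j) hmem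
  simpa [← hr] using this

lemma sup_eq (arr : List Int) (t k : Int) (hk : 0 ≤ k) :
    supA arr t k arr.length = supB arr t k (Pl arr t).length :=
  le_antisymm (supA_le_supB arr t k hk) (supB_le_supA arr t k hk)

lemma inner_eq (arr : List Int) (t k : Int) (hk : 0 ≤ k) (m0 : Int) (hm0 : 0 ≤ m0) :
    innerA arr t k m0 = innerB ((Pl arr t).map (fun (a : Nat) => (a : Int))) k m0 := by
  rw [innerA_eq arr t k hk m0 hm0, innerB_eq arr t k hk m0 hm0, sup_eq arr t k hk]

lemma innerA_nonneg (arr : List Int) (t k : Int) (hk : 0 ≤ k) (m0 : Int) (hm0 : 0 ≤ m0) :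
    0 ≤ innerA arr t k m0 := by
  rw [innerA_eq arr t k hk m0 hm0]
  omega

-- ---- grouping dict / outer fold ----
lemma posInt_eq (arr : List Int) (v : Int) :
    ((PySem.List.enumerate arr).filter (fun p => p.2 == v)).map (fun p => p.1) =
      (Pl arr v).map (fun (a : Nat) => (a : Int)) := by
  rw [PySem.List.enumerate_eq_map_pyRange (d := 0), PySem.List.pyRange_one]
  simp only [List.filter_map, List.map_map]
  unfold Pl
  simp [Function.comp_def, PySem.List.pyGetD_natCast]

lemma values_pos (arr : List Int) :
    PySem.Dict.values ((PySem.List.enumerate arr).foldl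
        (fun (d : PySem.Dict Int (List Int)) p => d.modify p.2 [] (· ++ [p.1])) PySem.Dict.empty) =
      (PySem.Set.ofList arr).map (fun v => (Pl arr v).map (fun (a : Nat) => (a : Int))) := by
  set pos := (PySem.List.enumerate arr).foldl
    (fun (d : PySem.Dict Int (List Int)) p => d.modify p.2 [] (· ++ [p.1])) PySem.Dict.empty with hpos
  have hkeys : pos.keys = PySem.Set.ofList arr := by
    rw [hpos, PySem.Dict.keys_foldl_modify_key]
    rw [PySem.Dict.keys_empty, PySem.List.map_snd_enumerate, PySem.Set.update_nil_left]
  have hnodup : pos.keys.Nodup := by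
    rw [hpos]
    exact PySem.Dict.nodup_keys_foldl_modify_key _ _ _ _ _ PySem.Dict.nodup_keys_empty
  rw [PySem.Dict.values_eq_map_keys pos hnodup [], hkeys]
  apply List.map_congr_left
  intro v _
  have hswap : pos = ((PySem.List.enumerate arr).map Prod.swap).foldl
      (fun (d : PySem.Dict Int (List Int)) p => d.modify p.1 [] (· ++ [p.2])) PySem.Dict.empty := by
    rw [List.foldl_map]
    simp only [Prod.fst_swap, Prod.snd_swap]
    exact hpos
  rw [hswap, PySem.Dict.getD_foldl_modify_append, PySem.Dict.getD_empty]
  rw [List.nil_append, List.filter_map, List.map_map]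
  rw [← posInt_eq arr v]
  congr 1

lemma outer_fold (arr : List Int) (k : Int) (hk : 0 ≤ k) :
    ∀ (l : List Int) (acc : Int), 0 ≤ acc →
    l.foldl (fun max_len target => innerA arr target k max_len) acc =
      l.foldl (fun best v => innerB ((Pl arr v).map (fun (a : Nat) => (a : Int))) k best) acc := by
  intro l
  induction l with
  | nil => intro acc _; rfl
  | cons y ys ih =>
    intro acc hacc
    simp only [List.foldl_cons]
    rw [← inner_eq arr y k hk acc hacc]
    exact ih _ (innerA_nonneg arr y k hk acc hacc)

theorem ports_agree (arr : List Int) (k : Int) (h : arr = [] ∨ 0 ≤ k) :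
    longest_subsegment arr k = longest_subsegment_alt arr k := by
  rcases h with h | hk
  · subst h; rfl
  · unfold longest_subsegment longest_subsegment_alt
    rw [values_pos, List.foldl_map]
    exact outer_fold arr k hk _ 0 le_rfl

-- ===== VERDICT (by name: the statement is the Claim_ definition above) =====
theorem longest_subsegment_spec : Claim_equal_longest_subsegment := by
  intro arr k _ hpre
  unfold Spec_longest_subsegment
  exact ports_agree arr k hpre
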